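-- pv_equiv track=rewrite | github.com/joernbilicki/everybody_codes | 2025/quest_05/python/utils.py | create_fishbone
-- ===== SOURCE A (Python) =====
-- NaN = -1
--
-- def add_new_spine(quality_data, fishbone):
--     """
--     Creates a new spine and adds it to a given list.
--     Every spimne contains up to three elements:
--     - Index 0: The value less than the spine value (init value: NaN).
--     - Index 1: The spine value (equals to quality_data).
--     - Index 2: The value greater than the spine value (init value: NaN).
--
--     :param quality_data: quality value for the new spine.
--     :param fishbone: List to add the new spine to.
--     """
--     new_spine = [NaN, quality_data, NaN]
--     fishbone.append(new_spine)
--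
-- def create_fishbone(quality_data):
--     """
--     Creates the complete fishbone.
--     The fishbone is finally a list of inner lists.
--     The resulting quality is equal to the concatenation of the spine values (index 1).
--
--     :param quality_data: List of quality values.
--     :return: The complete fishbone.
--     """
--     fishbone = []
--
--     add_new_spine(quality_data[0], fishbone)
--
--     for i in range(1, len(quality_data)):
--         next_value = quality_data[i]
--         new_spine_required = True
--         for current_spine in fishbone:
--             if next_value < current_spine[1] and current_spine[0] == NaN:
--                 current_spine[0] = next_value
--                 new_spine_required = False
--                 break
--             elif next_value > current_spine[1] and current_spine[2] == NaN:
--                 current_spine[2] = next_value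
--                 new_spine_required = False
--                 break
--         if new_spine_required:
--             add_new_spine(next_value, fishbone)
--
--     return fishbone
-- ===== SOURCE B (Python) =====
-- NaN = -1
--
-- # Faster fishbone construction: instead of rescanning every spine for each value,
-- # two segment trees over the rank-compressed values hold, per value, the FIFO of
-- # spine indices whose left (resp. right) slot is still open.  The first spine that
-- # accepts a value v is simply the minimal open index among spines with value > v
-- # (left slot) or value < v (right slot), which is one O(log n) range-min query.
--
--
-- def _mn(a, b):
--     """Minimum of two optional indices (None = +infinity)."""
--     if a is None:
--         return b
--     if b is None:
--         return a
--     return a if a < b else b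
--
--
-- def _make(size):
--     """Segment tree over ranks [0, size); each leaf holds a FIFO of spine indices."""
--     if size == 1:
--         return {'q': []}
--     half = size // 2
--     return {'min': None, 'l': _make(half), 'r': _make(size - half)}
--
--
-- def _tmin(t):
--     if 'q' in t:
--         return t['q'][0] if t['q'] else None
--     return t['min']
--
--
-- def _push(t, size, r, i):
--     """Append spine index i to the queue at rank r (indices arrive increasing)."""
--     if 'q' in t:
--         t['q'].append(i)
--     else:
--         half = size // 2
--         if r < half:
--             _push(t['l'], half, r, i)
--         else:
--             _push(t['r'], size - half, r - half, i)
--         t['min'] = _mn(_tmin(t['l']), _tmin(t['r']))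
--
--
-- def _pop(t, size, r):
--     """Remove the front (minimal) index of the queue at rank r."""
--     if 'q' in t:
--         t['q'].pop(0)
--     else:
--         half = size // 2
--         if r < half:
--             _pop(t['l'], half, r)
--         else:
--             _pop(t['r'], size - half, r - half)
--         t['min'] = _mn(_tmin(t['l']), _tmin(t['r']))
--
--
-- def _query(t, size, lo, hi):
--     """Minimal queued index over ranks in [lo, hi) (None if there is none)."""
--     if hi <= 0 or size <= lo:
--         return None
--     if lo <= 0 and size <= hi:
--         return _tmin(t)
--     half = size // 2
--     return _mn(_query(t['l'], half, lo, hi),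
--                _query(t['r'], size - half, lo - half, hi - half))
--
--
-- def create_fishbone(quality_data):
--     vals = sorted(set(quality_data))
--     rk = {v: r for r, v in enumerate(vals)}
--     m = len(vals)
--     left_open = _make(m) if m else None    # keyed by spine value rank, slot 0 open
--     right_open = _make(m) if m else None   # keyed by spine value rank, slot 2 open
--     fishbone = []
--     ranks = []                             # rank of each spine's value
--     for v in quality_data:
--         r = rk[v]
--         iL = _query(left_open, m, r + 1, m)   # spine value > v, left slot open
--         iR = _query(right_open, m, 0, r)      # spine value < v, right slot open
--         if iL is not None and (iR is None or iL < iR):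
--             fishbone[iL][0] = v
--             _pop(left_open, m, ranks[iL])
--         elif iR is not None:
--             fishbone[iR][2] = v
--             _pop(right_open, m, ranks[iR])
--         else:
--             i = len(fishbone)
--             fishbone.append([NaN, v, NaN])
--             ranks.append(r)
--             _push(left_open, m, r, i)
--             _push(right_open, m, r, i)
--     return fishbone
-- ===== Notes on version B (the rewrite author's own statement) =====
-- stated objective: faster
-- what changed: B replaces A's per-value rescan of all spines by two segment trees over the rank-compressed values holding FIFOs of open left/right slot indices, so each placement is one O(log n) range-min query; Pre_ excludes the empty list (A raises IndexError) and lists whose tail contains -1, A's NaN sentinel, where a value placed into a slot is indistinguishable from an empty slot and A may later place a second value into the same slot.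
-- outside the precondition, e.g. on create_fishbone([5, -1, 3]): A returns [[3, 5, -1]], B returns [[-1, 5, -1], [-1, 3, -1]]
import Mathlib
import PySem

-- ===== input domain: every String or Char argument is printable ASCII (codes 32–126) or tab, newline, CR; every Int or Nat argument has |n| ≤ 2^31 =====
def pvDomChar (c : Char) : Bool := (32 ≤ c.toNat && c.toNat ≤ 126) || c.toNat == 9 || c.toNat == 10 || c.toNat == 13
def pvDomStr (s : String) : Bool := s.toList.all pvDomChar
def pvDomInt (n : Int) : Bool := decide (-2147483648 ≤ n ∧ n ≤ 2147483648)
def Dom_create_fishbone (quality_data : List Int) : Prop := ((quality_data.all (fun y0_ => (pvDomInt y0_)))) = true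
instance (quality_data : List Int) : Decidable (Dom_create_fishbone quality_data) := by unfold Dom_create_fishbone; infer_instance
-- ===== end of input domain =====

-- B replaces A's per-value rescan of all spines by two segment trees over the
-- rank-compressed values (objective: faster, measured on large inputs).

def pvNaN : Int := -1

-- ===== PORT A =====
-- inner 'for current_spine in fishbone: … break' loop of A: the first fitting spine
-- is updated in place; none = 'new_spine_required' stayed True.
def placeA (v : Int) : List (List Int) → Option (List (List Int))
  | [] => none
  | s :: rest =>
    if v < s.getD 1 0 ∧ s.getD 0 0 = pvNaN then
      some (s.set 0 v :: rest)
    else if v > s.getD 1 0 ∧ s.getD 2 0 = pvNaN then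
      some (s.set 2 v :: rest)
    else (placeA v rest).map (s :: ·)

-- one iteration of A's outer loop body
def stepA (fb : List (List Int)) (v : Int) : List (List Int) :=
  match placeA v fb with
  | some fb' => fb'
  | none => fb ++ [[pvNaN, v, pvNaN]]

def create_fishbone (quality_data : List Int) : List (List Int) :=
  match quality_data with
  | [] => []   -- Python raises IndexError here (quality_data[0]); excluded by Pre_
  | x :: rest => rest.foldl stepA [[pvNaN, x, pvNaN]]

-- ===== PORT B =====
-- segment tree over value ranks; a leaf holds the FIFO of open spine indices of
-- that rank (indices are Python ints, always ≥ 0, so stored as Nat)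
inductive SegT : Type
  | leaf : List Nat → SegT
  | node : Option Nat → SegT → SegT → SegT
deriving Repr, DecidableEq

-- _mn: minimum of two optional indices (None = +infinity)
def mnO (a b : Option Nat) : Option Nat :=
  match a, b with
  | none, y => y
  | x, none => x
  | some x, some y => if x < y then some x else some y

-- _make
def stMake : Nat → SegT
  | 0 => .leaf []        -- Python keeps None for m = 0; that tree is never used
  | 1 => .leaf []
  | (n+2) => .node none (stMake ((n+2)/2)) (stMake ((n+2) - (n+2)/2))
decreasing_by all_goals omega

-- _tmin
def stTmin : SegT → Option Nat
  | .leaf q => q.head?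
  | .node mv _ _ => mv

-- _push
def stPush : SegT → Nat → Nat → Nat → SegT
  | .leaf q, _, _, i => .leaf (q ++ [i])
  | .node _ l r, size, rk, i =>
    if rk < size / 2 then
      .node (mnO (stTmin (stPush l (size / 2) rk i)) (stTmin r)) (stPush l (size / 2) rk i) r
    else
      .node (mnO (stTmin l) (stTmin (stPush r (size - size / 2) (rk - size / 2) i))) l
        (stPush r (size - size / 2) (rk - size / 2) i)

-- _pop (q.pop(0); the queue is never empty when B pops)
def stPop : SegT → Nat → Nat → SegT
  | .leaf q, _, _ => .leaf q.tail
  | .node _ l r, size, rk =>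
    if rk < size / 2 then
      .node (mnO (stTmin (stPop l (size / 2) rk)) (stTmin r)) (stPop l (size / 2) rk) r
    else
      .node (mnO (stTmin l) (stTmin (stPop r (size - size / 2) (rk - size / 2)))) l
        (stPop r (size - size / 2) (rk - size / 2))

-- _query (bounds are Python ints: they go negative in the right subtree)
def stQuery : SegT → Nat → Int → Int → Option Nat
  | t, size, lo, hi =>
    if hi ≤ 0 ∨ (size : Int) ≤ lo then none
    else if lo ≤ 0 ∧ (size : Int) ≤ hi then stTmin t
    else
      match t with
      | .leaf _ => none   -- unreachable: for size = 1 one of the branches above fires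
      | .node _ l r =>
        mnO (stQuery l (size / 2) lo hi)
            (stQuery r (size - size / 2) (lo - (size / 2 : Nat)) (hi - (size / 2 : Nat)))

-- one iteration of B's loop body over the state (fishbone, ranks, left tree, right tree)
def stepB (rk : PySem.Dict Int Int) (m : Nat)
    (st : List (List Int) × List Nat × SegT × SegT) (v : Int) :
    List (List Int) × List Nat × SegT × SegT :=
  let fb := st.1
  let ranks := st.2.1
  let L := st.2.2.1
  let R := st.2.2.2
  let r := (PySem.Dict.getD rk v 0).toNat   -- rk[v]; ranks are list indices, ≥ 0
  match stQuery L m ((r : Int) + 1) (m : Int), stQuery R m 0 (r : Int) with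
  | some iL, none =>
      (fb.set iL ((fb.getD iL []).set 0 v), ranks, stPop L m (ranks.getD iL 0), R)
  | some iL, some iR =>
      if iL < iR then
        (fb.set iL ((fb.getD iL []).set 0 v), ranks, stPop L m (ranks.getD iL 0), R)
      else
        (fb.set iR ((fb.getD iR []).set 2 v), ranks, L, stPop R m (ranks.getD iR 0))
  | none, some iR =>
      (fb.set iR ((fb.getD iR []).set 2 v), ranks, L, stPop R m (ranks.getD iR 0))
  | none, none =>
      (fb ++ [[pvNaN, v, pvNaN]], ranks ++ [r], stPush L m r fb.length, stPush R m r fb.length)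

def create_fishbone_alt (quality_data : List Int) : List (List Int) :=
  let vals := PySem.List.sorted (PySem.Set.ofList quality_data) (fun x => x) false
  let rk := (PySem.List.enumerate vals 0).foldl
      (fun d p => PySem.Dict.insert d p.2 p.1) PySem.Dict.empty
  let m := vals.length
  (quality_data.foldl (stepB rk m) ([], [], stMake m, stMake m)).1

-- ===== PRECONDITION & SPEC =====
-- Pre_ excludes the empty list, on which A raises IndexError, and lists whose tail
-- contains -1, A's NaN empty-slot sentinel: a -1 placed into a slot is
-- indistinguishable from an empty slot, so A may place a later value into the same
-- slot — an unspecifiable corner; B treats a filled slot as filled.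
def Pre_create_fishbone (quality_data : List Int) : Prop :=
  quality_data ≠ [] ∧ (-1 : Int) ∉ quality_data.drop 1
instance (quality_data : List Int) : Decidable (Pre_create_fishbone quality_data) := by
  unfold Pre_create_fishbone; infer_instance
def pvWitness_create_fishbone : List Int := [3, 1, 4, 1]

def Spec_create_fishbone (quality_data : List Int) (out : List (List Int)) : Prop :=
  out = create_fishbone_alt quality_data
instance (quality_data : List Int) (out : List (List Int)) :
    Decidable (Spec_create_fishbone quality_data out) := by
  unfold Spec_create_fishbone; infer_instance

-- ===== CLAIM (what is proved, stated in full; the proofs are below) =====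
def Claim_equal_create_fishbone : Prop :=
  ∀ (quality_data : List Int), Dom_create_fishbone quality_data →
    Pre_create_fishbone quality_data →
    Spec_create_fishbone quality_data (create_fishbone quality_data)

-- ===== LEMMAS AND PROOFS =====

-- ---------- option-min and list-min toolkit ----------
theorem mnO_none_right (a : Option Nat) : mnO a none = a := by cases a <;> rfl

theorem mnO_comm (a b : Option Nat) : mnO a b = mnO b a := by
  cases a <;> cases b <;> simp only [mnO] <;> split_ifs <;>
    simp only [Option.some.injEq] <;> omega

theorem mnO_assoc (a b c : Option Nat) : mnO (mnO a b) c = mnO a (mnO b c) := by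
  cases a with
  | none => rfl
  | some x =>
    cases b with
    | none => rfl
    | some y =>
      cases c with
      | none => rw [mnO_none_right, mnO_none_right]
      | some z =>
        by_cases h1 : x < y <;> by_cases h2 : y < z <;> by_cases h3 : x < z <;>
          simp [mnO, h1, h2, h3] <;> omega

def lmin (xs : List Nat) : Option Nat :=
  xs.foldr (fun x acc => mnO (some x) acc) none

theorem lmin_cons (x : Nat) (xs : List Nat) :
    lmin (x :: xs) = mnO (some x) (lmin xs) := rfl

theorem lmin_append (xs ys : List Nat) :
    lmin (xs ++ ys) = mnO (lmin xs) (lmin ys) := by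
  induction xs with
  | nil => rfl
  | cons x xs ih => simp [lmin_cons, ih, mnO_assoc]

theorem lmin_eq_none {xs : List Nat} : lmin xs = none ↔ xs = [] := by
  induction xs with
  | nil => simp [lmin]
  | cons x xs _ => rw [lmin_cons]; cases lmin xs <;> simp [mnO] <;> split_ifs <;> simp

theorem lmin_mem {xs : List Nat} {a : Nat} (h : lmin xs = some a) : a ∈ xs := by
  induction xs with
  | nil => simp [lmin] at h
  | cons x xs ih =>
    rw [lmin_cons] at h
    cases hx : lmin xs with
    | none => rw [hx, mnO_none_right] at h; simp at h; simp [h]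
    | some b =>
      rw [hx] at h
      by_cases hb : x < b
      · simp [mnO, hb] at h; simp [h]
      · simp [mnO, hb] at h; subst h; exact List.mem_cons_of_mem _ (ih hx)

theorem lmin_le {xs : List Nat} {a b : Nat} (h : lmin xs = some a) (hb : b ∈ xs) :
    a ≤ b := by
  induction xs generalizing a b with
  | nil => simp at hb
  | cons x xs ih =>
    rw [lmin_cons] at h
    cases hx : lmin xs with
    | none =>
      rw [hx, mnO_none_right] at h
      rw [lmin_eq_none.1 hx] at hb
      simp at h hb
      omega
    | some c =>
      rw [hx] at h
      have hac : a ≤ x ∧ a ≤ c := by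
        simp only [mnO] at h
        split_ifs at h <;> simp only [Option.some.injEq] at h <;> omega
      rcases List.mem_cons.1 hb with rfl | hb'
      · exact hac.1
      · exact le_trans hac.2 (ih hx hb')

theorem lmin_head_sorted {xs : List Nat} (h : xs.Pairwise (· < ·)) :
    lmin xs = xs.head? := by
  induction xs with
  | nil => rfl
  | cons x xs ih =>
    rw [lmin_cons]
    have hlt : ∀ y ∈ xs, x < y := fun y hy => (List.pairwise_cons.1 h).1 y hy
    cases hx : lmin xs with
    | none => rw [mnO_none_right]; rfl
    | some b =>
      have : x < b := hlt b (lmin_mem hx)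
      simp [mnO, this]

theorem lmin_perm {xs ys : List Nat} (h : xs.Perm ys) : lmin xs = lmin ys := by
  induction h with
  | nil => rfl
  | cons x _ ih => rw [lmin_cons, lmin_cons, ih]
  | swap x y l =>
    rw [lmin_cons, lmin_cons, lmin_cons, lmin_cons, ← mnO_assoc, ← mnO_assoc,
      mnO_comm (some y) (some x)]
  | trans _ _ ih1 ih2 => rw [ih1, ih2]

-- ---------- segment-tree invariant ----------
-- the tree t mirrors the queue family g on ranks [0, size); queues are increasing
def stInv : SegT → Nat → (Nat → List Nat) → Prop
  | .leaf q, size, g => size = 1 ∧ q = g 0 ∧ q.Pairwise (· < ·)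
  | .node mv l r, size, g =>
      2 ≤ size ∧ stInv l (size / 2) g ∧
      stInv r (size - size / 2) (fun j => g (size / 2 + j)) ∧
      mv = mnO (stTmin l) (stTmin r)

-- what a range query means: the minimum over all queues whose rank lies in [lo, hi)
def qspec (g : Nat → List Nat) (size : Nat) (lo hi : Int) : Option Nat :=
  lmin (((List.range size).filter
    (fun (ρ : Nat) => decide (lo ≤ (ρ : Int) ∧ (ρ : Int) < hi))).flatMap g)

theorem stInv_congr {t : SegT} {size : Nat} {g g' : Nat → List Nat}
    (hg : ∀ ρ < size, g ρ = g' ρ) (h : stInv t size g) : stInv t size g' := by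
  induction t generalizing size g g' with
  | leaf q =>
    obtain ⟨h1, h2, h3⟩ := h
    subst h1
    exact ⟨rfl, h2.trans (hg 0 (by omega)), h3⟩
  | node mv l r ihl ihr =>
    obtain ⟨hs, hl, hr, hm⟩ := h
    refine ⟨hs, ihl (fun ρ hρ => hg ρ (by omega)) hl,
      ihr (fun j hj => hg (size / 2 + j) (by omega)) hr, hm⟩

theorem stTmin_make (size : Nat) : stTmin (stMake size) = none := by
  rcases size with _ | _ | n <;> rw [stMake] <;> rfl

theorem stInv_make {size : Nat} (h : 1 ≤ size) :
    stInv (stMake size) size (fun _ => []) := by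
  induction size using stMake.induct with
  | case1 => omega
  | case2 => rw [stMake]; exact ⟨rfl, rfl, List.Pairwise.nil⟩
  | case3 n ih1 ih2 =>
    rw [stMake]
    refine ⟨by omega, ih1 (by omega), ih2 (by omega), ?_⟩
    rw [stTmin_make, stTmin_make]
    rfl

theorem stTmin_inv {t : SegT} {size : Nat} {g : Nat → List Nat}
    (h : stInv t size g) : stTmin t = lmin ((List.range size).flatMap g) := by
  induction t generalizing size g with
  | leaf q =>
    obtain ⟨h1, h2, h3⟩ := h
    subst h1
    have hg0 : List.flatMap g (List.range 1) = g 0 := by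
      rw [List.range_one]
      simp
    rw [stTmin, hg0, ← h2, lmin_head_sorted h3]
  | node mv l r ihl ihr =>
    obtain ⟨hs, hl, hr, hm⟩ := h
    have hsplit : List.range size =
        List.range (size / 2) ++ (List.range (size - size / 2)).map (size / 2 + ·) := by
      conv_lhs => rw [show size = size / 2 + (size - size / 2) by omega]
      exact List.range_add
    rw [stTmin, hm, ihl hl, ihr hr, hsplit, List.flatMap_append, lmin_append,
      List.flatMap_map]

theorem qspec_empty {g : Nat → List Nat} {size : Nat} {lo hi : Int}
    (h : hi ≤ 0 ∨ (size : Int) ≤ lo) : qspec g size lo hi = none := by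
  unfold qspec
  have : ((List.range size).filter
      (fun (ρ : Nat) => decide (lo ≤ (ρ : Int) ∧ (ρ : Int) < hi))) = [] := by
    rw [List.filter_eq_nil_iff]
    intro ρ hρ
    rw [List.mem_range] at hρ
    simp only [decide_eq_true_eq, not_and]
    intro h1
    omega
  rw [this]
  rfl

theorem qspec_full {g : Nat → List Nat} {size : Nat} {lo hi : Int}
    (h1 : lo ≤ 0) (h2 : (size : Int) ≤ hi) :
    qspec g size lo hi = lmin ((List.range size).flatMap g) := by
  unfold qspec
  have hf : ((List.range size).filter
      (fun (ρ : Nat) => decide (lo ≤ (ρ : Int) ∧ (ρ : Int) < hi))) = List.range size := by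
    rw [List.filter_eq_self]
    intro ρ hρ
    rw [List.mem_range] at hρ
    simp only [decide_eq_true_eq]
    omega
  rw [hf]

theorem qspec_split (g : Nat → List Nat) (size half : Nat) (lo hi : Int)
    (h : half ≤ size) :
    qspec g size lo hi =
      mnO (qspec g half lo hi)
          (qspec (fun j => g (half + j)) (size - half) (lo - half) (hi - half)) := by
  unfold qspec
  have hsplit : List.range size =
      List.range half ++ (List.range (size - half)).map (half + ·) := by
    conv_lhs => rw [show size = half + (size - half) by omega]
    exact List.range_add
  rw [hsplit, List.filter_append, List.flatMap_append, lmin_append, List.filter_map,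
    List.flatMap_map]
  have hfc : List.filter
        ((fun (ρ : Nat) => decide (lo ≤ (ρ : Int) ∧ (ρ : Int) < hi)) ∘ fun x => half + x)
        (List.range (size - half)) =
      List.filter
        (fun (ρ : Nat) => decide (lo - (half : Int) ≤ (ρ : Int) ∧ (ρ : Int) < hi - (half : Int)))
        (List.range (size - half)) :=
    List.filter_congr (fun j _ => by
      simp only [Function.comp_apply, decide_eq_decide]
      push_cast
      omega)
  rw [hfc]

theorem query_eq {t : SegT} {size : Nat} {g : Nat → List Nat} (lo hi : Int)
    (h : stInv t size g) : stQuery t size lo hi = qspec g size lo hi := by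
  induction t generalizing size g lo hi with
  | leaf q =>
    obtain ⟨h1, h2, h3⟩ := h
    subst h1
    rw [stQuery]
    split_ifs with c1 c2
    · exact (qspec_empty c1).symm
    · have hg0 : List.flatMap g (List.range 1) = g 0 := by
        rw [List.range_one]
        simp
      rw [qspec_full c2.1 c2.2, stTmin, hg0, ← h2, lmin_head_sorted h3]
    · push_neg at c1 c2
      simp only [Nat.cast_one] at c1 c2
      omega
  | node mv l r ihl ihr =>
    obtain ⟨hs, hl, hr, hm⟩ := h
    rw [stQuery]
    split_ifs with c1 c2
    · exact (qspec_empty c1).symm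
    · rw [qspec_full c2.1 c2.2, stTmin, hm, stTmin_inv hl, stTmin_inv hr]
      have hsplit : List.range size =
          List.range (size / 2) ++ (List.range (size - size / 2)).map (size / 2 + ·) := by
        conv_lhs => rw [show size = size / 2 + (size - size / 2) by omega]
        exact List.range_add
      rw [hsplit, List.flatMap_append, lmin_append, List.flatMap_map]
    · rw [ihl _ _ hl, ihr _ _ hr,
        qspec_split g size (size / 2) lo hi (by omega)]

theorem stPush_inv {t : SegT} {size : Nat} {g : Nat → List Nat} {r i : Nat}
    (h : stInv t size g) (hr : r < size) (hlt : ∀ x ∈ g r, x < i) :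
    stInv (stPush t size r i) size
      (fun ρ => if ρ = r then g r ++ [i] else g ρ) := by
  induction t generalizing size g r with
  | leaf q =>
    obtain ⟨h1, h2, h3⟩ := h
    subst h1
    have hr0 : r = 0 := by omega
    subst hr0
    refine ⟨rfl, by simp [h2], ?_⟩
    rw [List.pairwise_append]
    refine ⟨h3, by simp, ?_⟩
    intro x hx y hy
    rw [List.mem_singleton] at hy
    subst hy
    exact hlt x (h2 ▸ hx)
  | node mv l rt ihl ihr =>
    obtain ⟨hs, hl, hrt, hm⟩ := h
    rw [stPush]
    by_cases hc : r < size / 2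
    · rw [if_pos hc]
      refine ⟨hs, ihl hl hc hlt, ?_, rfl⟩
      exact stInv_congr (fun j _ => by
        have : size / 2 + j ≠ r := by omega
        simp [this]) hrt
    · rw [if_neg hc]
      refine ⟨hs, ?_, ?_, rfl⟩
      · exact stInv_congr (fun ρ hρ => by
          have : ρ ≠ r := by omega
          simp [this]) hl
      · have hkey : size / 2 + (r - size / 2) = r := by omega
        have hpush := ihr hrt (show r - size / 2 < size - size / 2 by omega)
          (by rw [hkey]; exact hlt)
        exact stInv_congr (fun j _ => by
          by_cases hj : j = r - size / 2
          · subst hj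
            simp [hkey]
          · have h1 : size / 2 + j ≠ r := by omega
            simp [hj, h1]) hpush

theorem stPop_inv {t : SegT} {size : Nat} {g : Nat → List Nat} {r : Nat}
    (h : stInv t size g) (hr : r < size) :
    stInv (stPop t size r) size
      (fun ρ => if ρ = r then (g r).tail else g ρ) := by
  induction t generalizing size g r with
  | leaf q =>
    obtain ⟨h1, h2, h3⟩ := h
    subst h1
    have hr0 : r = 0 := by omega
    subst hr0
    exact ⟨rfl, by simp [h2], h3.sublist (List.tail_sublist q)⟩
  | node mv l rt ihl ihr =>
    obtain ⟨hs, hl, hrt, hm⟩ := h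
    rw [stPop]
    by_cases hc : r < size / 2
    · rw [if_pos hc]
      refine ⟨hs, ihl hl hc, ?_, rfl⟩
      exact stInv_congr (fun j _ => by
        have : size / 2 + j ≠ r := by omega
        simp [this]) hrt
    · rw [if_neg hc]
      refine ⟨hs, ?_, ?_, rfl⟩
      · exact stInv_congr (fun ρ hρ => by
          have : ρ ≠ r := by omega
          simp [this]) hl
      · have hkey : size / 2 + (r - size / 2) = r := by omega
        have hpop := ihr hrt (show r - size / 2 < size - size / 2 by omega)
        exact stInv_congr (fun j _ => by
          by_cases hj : j = r - size / 2
          · subst hj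
            simp [hkey]
          · have h1 : size / 2 + j ≠ r := by omega
            simp [hj, h1]) hpop

-- ---------- A-side characterisation: first fit = minimal index ----------
abbrev condL (v : Int) (s : List Int) : Prop := v < s.getD 1 0 ∧ s.getD 0 0 = pvNaN
abbrev condR (v : Int) (s : List Int) : Prop := v > s.getD 1 0 ∧ s.getD 2 0 = pvNaN

def firstIdx (v : Int) : List (List Int) → Option Nat
  | [] => none
  | s :: rest =>
    if condL v s ∨ condR v s then some 0 else (firstIdx v rest).map (· + 1)

theorem placeA_eq (v : Int) (fb : List (List Int)) :
    placeA v fb = (firstIdx v fb).map (fun j =>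
      if condL v (fb.getD j []) then fb.set j ((fb.getD j []).set 0 v)
      else fb.set j ((fb.getD j []).set 2 v)) := by
  induction fb with
  | nil => rfl
  | cons s rest ih =>
    by_cases hL : condL v s
    · rw [placeA, if_pos hL, firstIdx, if_pos (Or.inl hL)]
      simp only [Option.map_some, List.getD_cons_zero]
      rw [if_pos hL]
      rfl
    · by_cases hR : condR v s
      · rw [placeA, if_neg hL, if_pos hR, firstIdx, if_pos (Or.inr hR)]
        simp only [Option.map_some, List.getD_cons_zero]
        rw [if_neg hL]
        rfl
      · rw [placeA, if_neg hL, if_neg hR, firstIdx,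
          if_neg (fun h => h.elim hL hR), ih]
        cases firstIdx v rest with
        | none => rfl
        | some j =>
          simp only [Option.map_some, Option.map_map]
          congr 1
          simp only [List.getD_cons_succ]
          split_ifs with h
          · rfl
          · rfl

theorem firstIdx_eq_head (v : Int) (fb : List (List Int)) :
    firstIdx v fb = ((List.range fb.length).filter
      (fun i => decide (condL v (fb.getD i []) ∨ condR v (fb.getD i [])))).head? := by
  induction fb with
  | nil => rfl
  | cons s rest ih =>
    rw [firstIdx]
    have hlen : (s :: rest).length = rest.length + 1 := rfl
    rw [hlen, List.range_succ_eq_map, List.filter_cons]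
    by_cases hc : condL v ((s :: rest).getD 0 []) ∨ condR v ((s :: rest).getD 0 [])
    · rw [if_pos (by simpa using hc), if_pos (by simpa using hc)]
      rfl
    · rw [if_neg (by simpa using hc), if_neg (by simpa using hc), List.filter_map,
        List.head?_map, ih]
      simp only [Function.comp_def, Nat.succ_eq_add_one, List.getD_cons_succ]

theorem firstIdx_eq_lmin (v : Int) (fb : List (List Int)) :
    firstIdx v fb = lmin ((List.range fb.length).filter
      (fun i => decide (condL v (fb.getD i []) ∨ condR v (fb.getD i [])))) := by
  rw [firstIdx_eq_head,
    lmin_head_sorted (List.pairwise_lt_range.sublist List.filter_sublist)]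

-- splitting a min over a disjunction of disjoint predicates
theorem lmin_filter_or (N : Nat) (p q : Nat → Prop) [DecidablePred p] [DecidablePred q]
    (hdisj : ∀ i, ¬(p i ∧ q i)) :
    lmin ((List.range N).filter (fun i => decide (p i ∨ q i))) =
      mnO (lmin ((List.range N).filter (fun i => decide (p i))))
          (lmin ((List.range N).filter (fun i => decide (q i)))) := by
  rw [← lmin_append]
  apply lmin_perm
  rw [List.perm_ext_iff_of_nodup (List.nodup_range.filter _)]
  · intro a
    simp only [List.mem_append, List.mem_filter, List.mem_range, decide_eq_true_eq]
    tauto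
  · rw [List.nodup_append]
    refine ⟨List.nodup_range.filter _, List.nodup_range.filter _, ?_⟩
    intro a ha b hb
    rintro rfl
    rw [List.mem_filter, decide_eq_true_eq] at ha hb
    exact hdisj a ⟨ha.2, hb.2⟩

-- flatMap of disjoint nodup lists is nodup
theorem nodup_flatMap_disj {l : List Nat} {f : Nat → List Nat}
    (hl : l.Nodup) (h1 : ∀ a ∈ l, (f a).Nodup)
    (h2 : ∀ a ∈ l, ∀ b ∈ l, a ≠ b → ∀ x ∈ f a, x ∉ f b) :
    (l.flatMap f).Nodup := by
  induction l with
  | nil => exact List.nodup_nil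
  | cons a t ih =>
    rw [List.flatMap_cons, List.nodup_append]
    refine ⟨h1 a (by simp), ?_, ?_⟩
    · exact ih (List.nodup_cons.1 hl).2 (fun b hb => h1 b (by simp [hb]))
        (fun b hb c hc => h2 b (by simp [hb]) c (by simp [hc]))
    · intro x hx y hy hxy
      subst hxy
      rw [List.mem_flatMap] at hy
      obtain ⟨b, hb, hxb⟩ := hy
      have hab : a ≠ b := by
        rintro rfl
        exact (List.nodup_cons.1 hl).1 hb
      exact h2 a (by simp) b (by simp [hb]) hab x hx hxb

-- rank is order-isomorphic on a strictly increasing list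
theorem idxOf_lt_iff {vals : List Int} (hp : vals.Pairwise (· < ·)) {a b : Int}
    (ha : a ∈ vals) (hb : b ∈ vals) : a < b ↔ vals.idxOf a < vals.idxOf b := by
  induction vals with
  | nil => cases ha
  | cons c t ih =>
    have hct := List.pairwise_cons.1 hp
    by_cases hac : a = c
    · subst hac
      by_cases hbc : b = a
      · subst hbc
        simp
      · have hbt : b ∈ t := (List.mem_cons.1 hb).resolve_left hbc
        rw [List.idxOf_cons_self, List.idxOf_cons_ne _ (fun h => hbc h.symm)]
        simp [hct.1 b hbt]
    · have hat : a ∈ t := (List.mem_cons.1 ha).resolve_left hac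
      by_cases hbc : b = c
      · subst hbc
        rw [List.idxOf_cons_self, List.idxOf_cons_ne _ (fun h => hac h.symm)]
        have := hct.1 a hat
        constructor
        · intro h
          omega
        · intro h
          omega
      · have hbt : b ∈ t := (List.mem_cons.1 hb).resolve_left hbc
        rw [List.idxOf_cons_ne _ (fun h => hac h.symm),
          List.idxOf_cons_ne _ (fun h => hbc h.symm)]
        rw [ih hct.2 hat hbt]
        omega

-- the rank dictionary built from enumerate(vals) looks up the index in vals
theorem getD_foldl_insert_not_mem (l : List (Int × Int)) (d : PySem.Dict Int Int)
    (v : Int) (h : ∀ p ∈ l, p.2 ≠ v) :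
    (l.foldl (fun d p => PySem.Dict.insert d p.2 p.1) d).getD v 0 = d.getD v 0 := by
  induction l generalizing d with
  | nil => rfl
  | cons p t ih =>
    rw [List.foldl_cons, ih _ (fun q hq => h q (by simp [hq]))]
    rw [PySem.Dict.getD_insert]
    rw [if_neg (fun hh => h p (by simp) (by rw [hh]))]

theorem rk_getD_aux (vals : List Int) (s : Int) (d : PySem.Dict Int Int)
    (hnd : vals.Nodup) (v : Int) (hv : v ∈ vals) :
    ((PySem.List.enumerate vals s).foldl
      (fun d p => PySem.Dict.insert d p.2 p.1) d).getD v 0 = s + vals.idxOf v := by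
  induction vals generalizing s d with
  | nil => cases hv
  | cons x t ih =>
    rw [PySem.List.enumerate_cons, List.foldl_cons]
    by_cases hvx : v = x
    · subst hvx
      have hvt : v ∉ t := (List.nodup_cons.1 hnd).1
      rw [getD_foldl_insert_not_mem _ _ _ ?side]
      case side =>
        intro p hp
        rw [PySem.List.mem_enumerate_iff] at hp
        obtain ⟨k, hk, rfl⟩ := hp
        intro hc
        exact hvt (hc ▸ List.getElem_mem hk)
      rw [PySem.Dict.getD_insert, if_pos rfl, List.idxOf_cons_self]
      simp
    · have hvt : v ∈ t := (List.mem_cons.1 hv).resolve_left hvx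
      rw [ih (s + 1) _ (List.nodup_cons.1 hnd).2 hvt,
        List.idxOf_cons_ne _ (fun h => hvx h.symm)]
      push_cast
      ring

-- ---------- fishbone/queue correspondence ----------
-- the queue of open slots (position p) of rank ρ: spine indices in increasing order
def QF (vals : List Int) (fb : List (List Int)) (p : Nat) (ρ : Nat) : List Nat :=
  (List.range fb.length).filter
    (fun i => decide ((fb.getD i []).getD p 0 = pvNaN ∧
      vals.idxOf ((fb.getD i []).getD 1 0) = ρ))

theorem QF_pairwise (vals fb p ρ) : (QF vals fb p ρ).Pairwise (· < ·) :=
  List.pairwise_lt_range.sublist List.filter_sublist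

theorem QF_mem {vals fb p ρ} {i : Nat} :
    i ∈ QF vals fb p ρ ↔ i < fb.length ∧ (fb.getD i []).getD p 0 = pvNaN ∧
      vals.idxOf ((fb.getD i []).getD 1 0) = ρ := by
  unfold QF
  simp [List.mem_filter, List.mem_range, decide_eq_true_eq, and_assoc]

theorem qspec_QF {vals : List Int} {fb : List (List Int)} {p : Nat} (lo hi : Int)
    (hin : ∀ i < fb.length, vals.idxOf ((fb.getD i []).getD 1 0) < vals.length) :
    qspec (QF vals fb p) vals.length lo hi =
      lmin ((List.range fb.length).filter
        (fun i => decide ((fb.getD i []).getD p 0 = pvNaN ∧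
          lo ≤ (vals.idxOf ((fb.getD i []).getD 1 0) : Int) ∧
          ((vals.idxOf ((fb.getD i []).getD 1 0) : Int) < hi)))) := by
  unfold qspec
  apply lmin_perm
  have hnodflat : (((List.range vals.length).filter
      (fun (ρ : Nat) => decide (lo ≤ (ρ : Int) ∧ (ρ : Int) < hi))).flatMap
        (QF vals fb p)).Nodup := by
    apply nodup_flatMap_disj (List.nodup_range.filter _)
    · intro ρ _
      exact List.nodup_range.filter _
    · intro a _ b _ hab x hxa hxb
      rw [QF_mem] at hxa hxb
      exact hab (hxa.2.2 ▸ hxb.2.2)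
  rw [List.perm_ext_iff_of_nodup hnodflat (List.nodup_range.filter _)]
  intro i
  rw [List.mem_flatMap]
  simp only [List.mem_filter, List.mem_range, decide_eq_true_eq]
  constructor
  · rintro ⟨ρ, ⟨_, hρb⟩, hq⟩
    rw [QF_mem] at hq
    exact ⟨hq.1, hq.2.1, hq.2.2 ▸ hρb⟩
  · rintro ⟨hiN, hopen, hb⟩
    refine ⟨vals.idxOf ((fb.getD i []).getD 1 0), ⟨⟨hin i hiN, hb⟩, ?_⟩⟩
    rw [QF_mem]
    exact ⟨hiN, hopen, rfl⟩

-- the run invariant tying A's fishbone to B's state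
def FbInv (vals : List Int) (fb : List (List Int))
    (st : List (List Int) × List Nat × SegT × SegT) : Prop :=
  st.1 = fb ∧
  st.2.1 = fb.map (fun s => vals.idxOf (s.getD 1 0)) ∧
  stInv st.2.2.1 vals.length (QF vals fb 0) ∧
  stInv st.2.2.2 vals.length (QF vals fb 2) ∧
  (∀ s ∈ fb, ∃ a b c, s = [a, b, c] ∧ b ∈ vals)

theorem fb_getD_mem {fb : List (List Int)} {i : Nat} (h : i < fb.length) :
    fb.getD i [] ∈ fb := by
  rw [List.getD_eq_getElem _ _ h]
  exact List.getElem_mem h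

theorem fb_val_mem {vals : List Int} {fb : List (List Int)}
    (h5 : ∀ s ∈ fb, ∃ a b c, s = [a, b, c] ∧ b ∈ vals) {i : Nat} (h : i < fb.length) :
    (fb.getD i []).getD 1 0 ∈ vals := by
  obtain ⟨a, b, c, hs, hb⟩ := h5 _ (fb_getD_mem h)
  rw [hs]
  exact hb

theorem fb_idx_lt {vals : List Int} {fb : List (List Int)}
    (h5 : ∀ s ∈ fb, ∃ a b c, s = [a, b, c] ∧ b ∈ vals) :
    ∀ i < fb.length, vals.idxOf ((fb.getD i []).getD 1 0) < vals.length :=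
  fun _ h => List.idxOf_lt_length_of_mem (fb_val_mem h5 h)

theorem query_left {vals : List Int} {fb : List (List Int)} {L : SegT} {v : Int}
    (hp : vals.Pairwise (· < ·)) (hv : v ∈ vals)
    (h3 : stInv L vals.length (QF vals fb 0))
    (h5 : ∀ s ∈ fb, ∃ a b c, s = [a, b, c] ∧ b ∈ vals) :
    stQuery L vals.length ((vals.idxOf v : Int) + 1) (vals.length : Int) =
      lmin ((List.range fb.length).filter
        (fun i => decide (condL v (fb.getD i [])))) := by
  rw [query_eq _ _ h3, qspec_QF _ _ (fb_idx_lt h5)]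
  congr 1
  apply List.filter_congr
  intro i hi
  rw [List.mem_range] at hi
  have hval := fb_val_mem h5 hi
  have hmono := idxOf_lt_iff hp hv hval
  have hidx := List.idxOf_lt_length_of_mem hval
  rw [decide_eq_decide]
  constructor
  · rintro ⟨hopen, hlo, _⟩
    exact ⟨hmono.mpr (by omega), hopen⟩
  · rintro ⟨hlt, hopen⟩
    have := hmono.mp hlt
    refine ⟨hopen, by omega, by omega⟩

theorem query_right {vals : List Int} {fb : List (List Int)} {R : SegT} {v : Int}
    (hp : vals.Pairwise (· < ·)) (hv : v ∈ vals)
    (h4 : stInv R vals.length (QF vals fb 2))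
    (h5 : ∀ s ∈ fb, ∃ a b c, s = [a, b, c] ∧ b ∈ vals) :
    stQuery R vals.length 0 (vals.idxOf v : Int) =
      lmin ((List.range fb.length).filter
        (fun i => decide (condR v (fb.getD i [])))) := by
  rw [query_eq _ _ h4, qspec_QF _ _ (fb_idx_lt h5)]
  congr 1
  apply List.filter_congr
  intro i hi
  rw [List.mem_range] at hi
  have hval := fb_val_mem h5 hi
  have hmono := idxOf_lt_iff hp hval hv
  rw [decide_eq_decide]
  constructor
  · rintro ⟨hopen, _, hhi⟩
    exact ⟨hmono.mpr (by omega), hopen⟩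
  · rintro ⟨hlt, hopen⟩
    have := hmono.mp hlt
    refine ⟨hopen, by omega, by omega⟩

theorem QF_append_spine (vals : List Int) (fb : List (List Int)) (w : Int)
    {p : Nat} (hpn : ([pvNaN, w, pvNaN] : List Int).getD p 0 = pvNaN) (ρ : Nat) :
    QF vals (fb ++ [[pvNaN, w, pvNaN]]) p ρ =
      QF vals fb p ρ ++ (if ρ = vals.idxOf w then [fb.length] else []) := by
  unfold QF
  rw [List.length_append, List.length_singleton, List.range_succ, List.filter_append]
  congr 1
  · apply List.filter_congr
    intro i hi
    rw [List.mem_range] at hi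
    rw [show (fb ++ [[pvNaN, w, pvNaN]]).getD i [] = fb.getD i [] by
      simp [List.getD, List.getElem?_append_left hi]]
  · rw [List.filter_singleton,
      show (fb ++ [[pvNaN, w, pvNaN]]).getD fb.length [] = [pvNaN, w, pvNaN] by
        simp [List.getD]]
    rcases eq_or_ne ρ (vals.idxOf w) with h | h
    · subst h
      simp only [List.getD] at hpn
      simp [hpn, List.getD]
    · simp only [List.getD] at hpn
      simp [hpn, List.getD]
      rw [if_neg (fun hc => h hc.symm), if_neg (fun hc => h hc)]

theorem sorted_min_head {xs : List Nat} {a : Nat} (hs : xs.Pairwise (· < ·))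
    (ha : a ∈ xs) (hmin : ∀ b ∈ xs, a ≤ b) : xs = a :: xs.tail := by
  cases xs with
  | nil => cases ha
  | cons h t =>
    rcases List.mem_cons.1 ha with rfl | hat
    · rfl
    · have h1 : h < a := (List.pairwise_cons.1 hs).1 a hat
      have h2 : a ≤ h := hmin h (by simp)
      omega

theorem fill_left_inv {vals : List Int} {fb : List (List Int)} {v : Int} {iL : Nat}
    (hp : vals.Pairwise (· < ·)) (hv : v ∈ vals) (hvN : v ≠ pvNaN)
    (h5 : ∀ s ∈ fb, ∃ a b c, s = [a, b, c] ∧ b ∈ vals)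
    (hCL : lmin ((List.range fb.length).filter
      (fun i => decide (condL v (fb.getD i [])))) = some iL) :
    (∀ s ∈ fb.set iL ((fb.getD iL []).set 0 v), ∃ a b c, s = [a, b, c] ∧ b ∈ vals) ∧
    (fb.set iL ((fb.getD iL []).set 0 v)).map (fun s => vals.idxOf (s.getD 1 0)) =
      fb.map (fun s => vals.idxOf (s.getD 1 0)) ∧
    (∀ ρ, QF vals (fb.set iL ((fb.getD iL []).set 0 v)) 0 ρ =
      if ρ = vals.idxOf ((fb.getD iL []).getD 1 0)
      then (QF vals fb 0 (vals.idxOf ((fb.getD iL []).getD 1 0))).tail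
      else QF vals fb 0 ρ) ∧
    (∀ ρ, QF vals (fb.set iL ((fb.getD iL []).set 0 v)) 2 ρ = QF vals fb 2 ρ) := by
  have hmemf := lmin_mem hCL
  rw [List.mem_filter, List.mem_range, decide_eq_true_eq] at hmemf
  obtain ⟨hiN, hcond⟩ := hmemf
  obtain ⟨a, b, c, hs, hb⟩ := h5 _ (fb_getD_mem hiN)
  have hval : (fb.getD iL []).getD 1 0 = b := by rw [hs]; rfl
  have hslot0 : (fb.getD iL []).getD 0 0 = a := by rw [hs]; rfl
  have hset : (fb.getD iL []).set 0 v = [v, b, c] := by rw [hs]; rfl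
  have hvb : v < b := by
    have := hcond.1
    rw [hval] at this
    exact this
  have haN : a = pvNaN := by
    have := hcond.2
    rw [hslot0] at this
    exact this
  have hlen : (fb.set iL ((fb.getD iL []).set 0 v)).length = fb.length :=
    List.length_set ..
  have hgetiL : (fb.set iL ((fb.getD iL []).set 0 v)).getD iL [] = [v, b, c] := by
    rw [List.getD_eq_getElem _ _ (hlen ▸ hiN), List.getElem_set_self, hset]
  have hgetne : ∀ i, i ≠ iL →
      (fb.set iL ((fb.getD iL []).set 0 v)).getD i [] = fb.getD i [] := by
    intro i hne
    by_cases hiN' : i < fb.length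
    · rw [List.getD_eq_getElem _ _ (hlen ▸ hiN'), List.getD_eq_getElem _ _ hiN',
        List.getElem_set_ne (fun h => hne h.symm)]
    · rw [List.getD_eq_default _ _ (by omega), List.getD_eq_default _ _ (by omega)]
  refine ⟨?_, ?_, ?_, ?_⟩
  · intro s hs'
    rcases List.mem_or_eq_of_mem_set hs' with h | h
    · exact h5 s h
    · exact ⟨v, b, c, h ▸ hset ▸ rfl, hb⟩
  · apply List.ext_getElem (by simp)
    intro i hi1 hi2
    rw [List.getElem_map, List.getElem_map]
    rcases eq_or_ne i iL with rfl | hne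
    · rw [List.getElem_set_self, hset]
      rw [show fb[i] = fb.getD i [] from (List.getD_eq_getElem _ _ (by simpa using hi2)).symm, hs]
      rfl
    · rw [List.getElem_set_ne (fun h => hne h.symm)]
  · intro ρ
    rcases eq_or_ne ρ (vals.idxOf ((fb.getD iL []).getD 1 0)) with hρ | hρ
    · subst hρ
      rw [if_pos rfl, hval]
      -- iL is the head of its rank queue; removing it is taking the tail
      have hQmem : iL ∈ QF vals fb 0 (vals.idxOf b) :=
        QF_mem.2 ⟨hiN, hslot0 ▸ haN, by rw [hval]⟩
      have hminq : ∀ j ∈ QF vals fb 0 (vals.idxOf b), iL ≤ j := by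
        intro j hj
        rw [QF_mem] at hj
        obtain ⟨hjN, hopen, hrank⟩ := hj
        have hvalj := fb_val_mem h5 hjN
        have hlt : v < (fb.getD j []).getD 1 0 := by
          rw [idxOf_lt_iff hp hv hvalj, hrank, ← idxOf_lt_iff hp hv hb]
          exact hvb
        exact lmin_le hCL (by
          rw [List.mem_filter, List.mem_range, decide_eq_true_eq]
          exact ⟨hjN, hlt, hopen⟩)
      have hhead := sorted_min_head (QF_pairwise vals fb 0 (vals.idxOf b)) hQmem hminq
      have hfilter : QF vals (fb.set iL ((fb.getD iL []).set 0 v)) 0 (vals.idxOf b) =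
          (QF vals fb 0 (vals.idxOf b)).filter (fun j => decide (j ≠ iL)) := by
        unfold QF
        rw [hlen, List.filter_filter]
        apply List.filter_congr
        intro i hi
        rcases eq_or_ne i iL with rfl | hne
        · rw [hgetiL]
          simp [hvN]
        · rw [hgetne i hne]
          simp [hne]
      rw [hfilter, hhead, List.filter_cons]
      rw [show (decide (iL ≠ iL)) = false by simp]
      simp only [Bool.false_eq_true, if_false]
      apply List.filter_eq_self.2
      intro j hj
      have hpw := hhead ▸ QF_pairwise vals fb 0 (vals.idxOf b)
      have : iL < j := (List.pairwise_cons.1 hpw).1 j hj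
      simp
      omega
    · rw [if_neg hρ]
      unfold QF
      rw [hlen]
      apply List.filter_congr
      intro i hi
      rcases eq_or_ne i iL with rfl | hne
      · rw [hgetiL]
        have e1 : decide (([v, b, c] : List Int).getD 0 0 = pvNaN ∧
            vals.idxOf (([v, b, c] : List Int).getD 1 0) = ρ) = false :=
          decide_eq_false (fun hh => hvN hh.1)
        have e2 : decide ((fb.getD i []).getD 0 0 = pvNaN ∧
            vals.idxOf ((fb.getD i []).getD 1 0) = ρ) = false :=
          decide_eq_false (fun hh => hρ hh.2.symm)
        rw [e1, e2]
      · rw [hgetne i hne]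
  · intro ρ
    unfold QF
    rw [hlen]
    apply List.filter_congr
    intro i hi
    rcases eq_or_ne i iL with rfl | hne
    · rw [hgetiL, hs]
      rfl
    · rw [hgetne i hne]

theorem fill_right_inv {vals : List Int} {fb : List (List Int)} {v : Int} {iR : Nat}
    (hp : vals.Pairwise (· < ·)) (hv : v ∈ vals) (hvN : v ≠ pvNaN)
    (h5 : ∀ s ∈ fb, ∃ a b c, s = [a, b, c] ∧ b ∈ vals)
    (hCR : lmin ((List.range fb.length).filter
      (fun i => decide (condR v (fb.getD i [])))) = some iR) :
    (∀ s ∈ fb.set iR ((fb.getD iR []).set 2 v), ∃ a b c, s = [a, b, c] ∧ b ∈ vals) ∧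
    (fb.set iR ((fb.getD iR []).set 2 v)).map (fun s => vals.idxOf (s.getD 1 0)) =
      fb.map (fun s => vals.idxOf (s.getD 1 0)) ∧
    (∀ ρ, QF vals (fb.set iR ((fb.getD iR []).set 2 v)) 2 ρ =
      if ρ = vals.idxOf ((fb.getD iR []).getD 1 0)
      then (QF vals fb 2 (vals.idxOf ((fb.getD iR []).getD 1 0))).tail
      else QF vals fb 2 ρ) ∧
    (∀ ρ, QF vals (fb.set iR ((fb.getD iR []).set 2 v)) 0 ρ = QF vals fb 0 ρ) := by
  have hmemf := lmin_mem hCR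
  rw [List.mem_filter, List.mem_range, decide_eq_true_eq] at hmemf
  obtain ⟨hiN, hcond⟩ := hmemf
  obtain ⟨a, b, c, hs, hb⟩ := h5 _ (fb_getD_mem hiN)
  have hval : (fb.getD iR []).getD 1 0 = b := by rw [hs]; rfl
  have hslot2 : (fb.getD iR []).getD 2 0 = c := by rw [hs]; rfl
  have hset : (fb.getD iR []).set 2 v = [a, b, v] := by rw [hs]; rfl
  have hvb : b < v := by
    have := hcond.1
    rw [hval] at this
    exact this
  have hcN : c = pvNaN := by
    have := hcond.2
    rw [hslot2] at this
    exact this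
  have hlen : (fb.set iR ((fb.getD iR []).set 2 v)).length = fb.length :=
    List.length_set ..
  have hgetiR : (fb.set iR ((fb.getD iR []).set 2 v)).getD iR [] = [a, b, v] := by
    rw [List.getD_eq_getElem _ _ (hlen ▸ hiN), List.getElem_set_self, hset]
  have hgetne : ∀ i, i ≠ iR →
      (fb.set iR ((fb.getD iR []).set 2 v)).getD i [] = fb.getD i [] := by
    intro i hne
    by_cases hiN' : i < fb.length
    · rw [List.getD_eq_getElem _ _ (hlen ▸ hiN'), List.getD_eq_getElem _ _ hiN',
        List.getElem_set_ne (fun h => hne h.symm)]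
    · rw [List.getD_eq_default _ _ (by omega), List.getD_eq_default _ _ (by omega)]
  refine ⟨?_, ?_, ?_, ?_⟩
  · intro s hs'
    rcases List.mem_or_eq_of_mem_set hs' with h | h
    · exact h5 s h
    · exact ⟨a, b, v, h ▸ hset ▸ rfl, hb⟩
  · apply List.ext_getElem (by simp)
    intro i hi1 hi2
    rw [List.getElem_map, List.getElem_map]
    rcases eq_or_ne i iR with rfl | hne
    · rw [List.getElem_set_self, hset]
      rw [show fb[i] = fb.getD i [] from (List.getD_eq_getElem _ _ (by simpa using hi2)).symm, hs]
      rfl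
    · rw [List.getElem_set_ne (fun h => hne h.symm)]
  · intro ρ
    rcases eq_or_ne ρ (vals.idxOf ((fb.getD iR []).getD 1 0)) with hρ | hρ
    · subst hρ
      rw [if_pos rfl, hval]
      have hQmem : iR ∈ QF vals fb 2 (vals.idxOf b) :=
        QF_mem.2 ⟨hiN, hslot2 ▸ hcN, by rw [hval]⟩
      have hminq : ∀ j ∈ QF vals fb 2 (vals.idxOf b), iR ≤ j := by
        intro j hj
        rw [QF_mem] at hj
        obtain ⟨hjN, hopen, hrank⟩ := hj
        have hvalj := fb_val_mem h5 hjN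
        have hlt : (fb.getD j []).getD 1 0 < v := by
          rw [idxOf_lt_iff hp hvalj hv, hrank, ← idxOf_lt_iff hp hb hv]
          exact hvb
        exact lmin_le hCR (by
          rw [List.mem_filter, List.mem_range, decide_eq_true_eq]
          exact ⟨hjN, hlt, hopen⟩)
      have hhead := sorted_min_head (QF_pairwise vals fb 2 (vals.idxOf b)) hQmem hminq
      have hfilter : QF vals (fb.set iR ((fb.getD iR []).set 2 v)) 2 (vals.idxOf b) =
          (QF vals fb 2 (vals.idxOf b)).filter (fun j => decide (j ≠ iR)) := by
        unfold QF
        rw [hlen, List.filter_filter]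
        apply List.filter_congr
        intro i hi
        rcases eq_or_ne i iR with rfl | hne
        · rw [hgetiR]
          simp [hvN]
        · rw [hgetne i hne]
          simp [hne]
      rw [hfilter, hhead, List.filter_cons]
      rw [show (decide (iR ≠ iR)) = false by simp]
      simp only [Bool.false_eq_true, if_false]
      apply List.filter_eq_self.2
      intro j hj
      have hpw := hhead ▸ QF_pairwise vals fb 2 (vals.idxOf b)
      have : iR < j := (List.pairwise_cons.1 hpw).1 j hj
      simp
      omega
    · rw [if_neg hρ]
      unfold QF
      rw [hlen]
      apply List.filter_congr
      intro i hi
      rcases eq_or_ne i iR with rfl | hne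
      · rw [hgetiR]
        have e1 : decide (([a, b, v] : List Int).getD 2 0 = pvNaN ∧
            vals.idxOf (([a, b, v] : List Int).getD 1 0) = ρ) = false :=
          decide_eq_false (fun hh => hvN hh.1)
        have e2 : decide ((fb.getD i []).getD 2 0 = pvNaN ∧
            vals.idxOf ((fb.getD i []).getD 1 0) = ρ) = false :=
          decide_eq_false (fun hh => hρ hh.2.symm)
        rw [e1, e2]
      · rw [hgetne i hne]
  · intro ρ
    unfold QF
    rw [hlen]
    apply List.filter_congr
    intro i hi
    rcases eq_or_ne i iR with rfl | hne
    · rw [hgetiR, hs]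
      rfl
    · rw [hgetne i hne]

theorem step_main {vals : List Int} {rk : PySem.Dict Int Int}
    {fb : List (List Int)} {v : Int}
    (hp : vals.Pairwise (· < ·))
    (hrk : ∀ w ∈ vals, PySem.Dict.getD rk w 0 = (vals.idxOf w : Int))
    (hv : v ∈ vals) (hvN : v ≠ pvNaN ∨ fb = [])
    {st : List (List Int) × List Nat × SegT × SegT}
    (hInv : FbInv vals fb st) :
    FbInv vals (stepA fb v) (stepB rk vals.length st v) := by
  obtain ⟨fb0, ranks, L, R⟩ := st
  obtain ⟨h1, h2, h3, h4, h5⟩ := hInv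
  dsimp only at h1 h2 h3 h4
  subst h1
  have hrm : vals.idxOf v < vals.length := List.idxOf_lt_length_of_mem hv
  have hr : (PySem.Dict.getD rk v 0).toNat = vals.idxOf v := by
    rw [hrk v hv, Int.toNat_natCast]
  have hdisj : ∀ i, ¬(condL v (fb0.getD i []) ∧ condR v (fb0.getD i [])) := by
    rintro i ⟨⟨hl, _⟩, ⟨hr', _⟩⟩
    omega
  have hqL := query_left hp hv h3 h5
  have hqR := query_right hp hv h4 h5
  have hA : placeA v fb0 = (mnO
      (lmin ((List.range fb0.length).filter (fun i => decide (condL v (fb0.getD i [])))))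
      (lmin ((List.range fb0.length).filter (fun i => decide (condR v (fb0.getD i [])))))).map
        (fun j =>
          if condL v (fb0.getD j []) then fb0.set j ((fb0.getD j []).set 0 v)
          else fb0.set j ((fb0.getD j []).set 2 v)) := by
    rw [placeA_eq, firstIdx_eq_lmin,
      lmin_filter_or fb0.length (fun i => condL v (fb0.getD i []))
        (fun i => condR v (fb0.getD i [])) hdisj]
  cases hCL : lmin ((List.range fb0.length).filter
      (fun i => decide (condL v (fb0.getD i [])))) with
  | none =>
    cases hCR : lmin ((List.range fb0.length).filter
        (fun i => decide (condR v (fb0.getD i [])))) with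
    | none =>
      -- no open slot fits: both programs append a fresh spine
      have hAv : stepA fb0 v = fb0 ++ [[pvNaN, v, pvNaN]] := by
        rw [stepA, hA, hCL, hCR]
        rfl
      have hBv : stepB rk vals.length (fb0, ranks, L, R) v =
          (fb0 ++ [[pvNaN, v, pvNaN]], ranks ++ [vals.idxOf v],
            stPush L vals.length (vals.idxOf v) fb0.length,
            stPush R vals.length (vals.idxOf v) fb0.length) := by
        simp only [stepB, hr]
        rw [hqL, hqR, hCL, hCR]
      rw [hAv, hBv]
      have hbnd0 : ∀ x ∈ QF vals fb0 0 (vals.idxOf v), x < fb0.length :=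
        fun x hx => (QF_mem.1 hx).1
      have hbnd2 : ∀ x ∈ QF vals fb0 2 (vals.idxOf v), x < fb0.length :=
        fun x hx => (QF_mem.1 hx).1
      refine ⟨rfl, ?_, ?_, ?_, ?_⟩
      · rw [List.map_append, h2]
        rfl
      · refine stInv_congr (fun ρ hρ => ?_) (stPush_inv h3 hrm hbnd0)
        rw [QF_append_spine vals fb0 v (by rfl) ρ]
        rcases eq_or_ne ρ (vals.idxOf v) with h | h
        · simp [h]
        · simp [h]
      · refine stInv_congr (fun ρ hρ => ?_) (stPush_inv h4 hrm hbnd2)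
        rw [QF_append_spine vals fb0 v (by rfl) ρ]
        rcases eq_or_ne ρ (vals.idxOf v) with h | h
        · simp [h]
        · simp [h]
      · intro s hs
        rcases List.mem_append.1 hs with hs | hs
        · exact h5 s hs
        · rw [List.mem_singleton] at hs
          exact ⟨pvNaN, v, pvNaN, hs, hv⟩
    | some iR =>
      -- only a right slot fits: fill spine iR's right slot
      have hvN' : v ≠ pvNaN := by
        rcases hvN with h | h
        · exact h
        · subst h
          simp [lmin] at hCR
      obtain ⟨hsh, hrank, hQ2, hQ0⟩ := fill_right_inv hp hv hvN' h5 hCR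
      have hmemR := lmin_mem hCR
      rw [List.mem_filter, List.mem_range, decide_eq_true_eq] at hmemR
      have hnotL : ¬ condL v (fb0.getD iR []) := by
        rintro ⟨hlt, _⟩
        have := hmemR.2.1
        omega
      have hAv : stepA fb0 v = fb0.set iR ((fb0.getD iR []).set 2 v) := by
        rw [stepA, hA, hCL, hCR]
        simp only [mnO, Option.map_some]
        rw [if_neg hnotL]
      have hBv : stepB rk vals.length (fb0, ranks, L, R) v =
          (fb0.set iR ((fb0.getD iR []).set 2 v), ranks, L,
            stPop R vals.length (ranks.getD iR 0)) := by
        simp only [stepB, hr]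
        rw [hqL, hqR, hCL, hCR]
      have hiRN : iR < fb0.length := hmemR.1
      have hrnk : ranks.getD iR 0 = vals.idxOf ((fb0.getD iR []).getD 1 0) := by
        rw [h2, List.getD_eq_getElem _ _ (by simpa using hiRN), List.getElem_map,
          List.getD_eq_getElem _ _ hiRN]
      have hρm : vals.idxOf ((fb0.getD iR []).getD 1 0) < vals.length :=
        List.idxOf_lt_length_of_mem (fb_val_mem h5 hiRN)
      rw [hAv, hBv]
      refine ⟨rfl, h2.trans hrank.symm, stInv_congr (fun ρ _ => (hQ0 ρ).symm) h3,
        ?_, hsh⟩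
      rw [hrnk]
      exact stInv_congr (fun ρ _ => (hQ2 ρ).symm) (stPop_inv h4 hρm)
  | some iL =>
    have hvN' : v ≠ pvNaN := by
      rcases hvN with h | h
      · exact h
      · subst h
        simp [lmin] at hCL
    obtain ⟨hsh, hrank, hQ0, hQ2⟩ := fill_left_inv hp hv hvN' h5 hCL
    have hmemL := lmin_mem hCL
    rw [List.mem_filter, List.mem_range, decide_eq_true_eq] at hmemL
    have hiLN : iL < fb0.length := hmemL.1
    have hrnk : ranks.getD iL 0 = vals.idxOf ((fb0.getD iL []).getD 1 0) := by
      rw [h2, List.getD_eq_getElem _ _ (by simpa using hiLN), List.getElem_map,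
        List.getD_eq_getElem _ _ hiLN]
    have hρm : vals.idxOf ((fb0.getD iL []).getD 1 0) < vals.length :=
      List.idxOf_lt_length_of_mem (fb_val_mem h5 hiLN)
    have hfillL : FbInv vals (fb0.set iL ((fb0.getD iL []).set 0 v))
        (fb0.set iL ((fb0.getD iL []).set 0 v), ranks, stPop L vals.length (ranks.getD iL 0), R) := by
      refine ⟨rfl, h2.trans hrank.symm, ?_,
        stInv_congr (fun ρ _ => (hQ2 ρ).symm) h4, hsh⟩
      rw [hrnk]
      exact stInv_congr (fun ρ _ => (hQ0 ρ).symm) (stPop_inv h3 hρm)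
    cases hCR : lmin ((List.range fb0.length).filter
        (fun i => decide (condR v (fb0.getD i [])))) with
    | none =>
      have hAv : stepA fb0 v = fb0.set iL ((fb0.getD iL []).set 0 v) := by
        rw [stepA, hA, hCL, hCR]
        simp only [mnO, Option.map_some]
        rw [if_pos hmemL.2]
      have hBv : stepB rk vals.length (fb0, ranks, L, R) v =
          (fb0.set iL ((fb0.getD iL []).set 0 v), ranks,
            stPop L vals.length (ranks.getD iL 0), R) := by
        simp only [stepB, hr]
        rw [hqL, hqR, hCL, hCR]
      rw [hAv, hBv]
      exact hfillL
    | some iR =>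
      by_cases hir : iL < iR
      · have hAv : stepA fb0 v = fb0.set iL ((fb0.getD iL []).set 0 v) := by
          rw [stepA, hA, hCL, hCR]
          simp only [mnO]
          rw [if_pos hir]
          simp only [Option.map_some]
          rw [if_pos hmemL.2]
        have hBv : stepB rk vals.length (fb0, ranks, L, R) v =
            (fb0.set iL ((fb0.getD iL []).set 0 v), ranks,
              stPop L vals.length (ranks.getD iL 0), R) := by
          simp only [stepB, hr]
          rw [hqL, hqR, hCL, hCR]
          simp only []
          rw [if_pos hir]
        rw [hAv, hBv]
        exact hfillL
      · obtain ⟨hshR, hrankR, hQ2R, hQ0R⟩ := fill_right_inv hp hv hvN' h5 hCR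
        have hmemR := lmin_mem hCR
        rw [List.mem_filter, List.mem_range, decide_eq_true_eq] at hmemR
        have hnotL : ¬ condL v (fb0.getD iR []) := by
          rintro ⟨hlt, _⟩
          have := hmemR.2.1
          omega
        have hAv : stepA fb0 v = fb0.set iR ((fb0.getD iR []).set 2 v) := by
          rw [stepA, hA, hCL, hCR]
          simp only [mnO]
          rw [if_neg hir]
          simp only [Option.map_some]
          rw [if_neg hnotL]
        have hBv : stepB rk vals.length (fb0, ranks, L, R) v =
            (fb0.set iR ((fb0.getD iR []).set 2 v), ranks, L,
              stPop R vals.length (ranks.getD iR 0)) := by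
          simp only [stepB, hr]
          rw [hqL, hqR, hCL, hCR]
          simp only []
          rw [if_neg hir]
        have hiRN : iR < fb0.length := hmemR.1
        have hrnkR : ranks.getD iR 0 = vals.idxOf ((fb0.getD iR []).getD 1 0) := by
          rw [h2, List.getD_eq_getElem _ _ (by simpa using hiRN), List.getElem_map,
            List.getD_eq_getElem _ _ hiRN]
        have hρmR : vals.idxOf ((fb0.getD iR []).getD 1 0) < vals.length :=
          List.idxOf_lt_length_of_mem (fb_val_mem h5 hiRN)
        rw [hAv, hBv]
        refine ⟨rfl, h2.trans hrankR.symm,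
          stInv_congr (fun ρ _ => (hQ0R ρ).symm) h3, ?_, hshR⟩
        rw [hrnkR]
        exact stInv_congr (fun ρ _ => (hQ2R ρ).symm) (stPop_inv h4 hρmR)

theorem fold_inv {vals : List Int} {rk : PySem.Dict Int Int}
    (hp : vals.Pairwise (· < ·))
    (hrk : ∀ w ∈ vals, PySem.Dict.getD rk w 0 = (vals.idxOf w : Int))
    (l : List Int) (fb : List (List Int))
    (st : List (List Int) × List Nat × SegT × SegT)
    (hl1 : ∀ w ∈ l, w ∈ vals) (hl2 : ∀ w ∈ l, w ≠ pvNaN)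
    (hInv : FbInv vals fb st) :
    FbInv vals (l.foldl stepA fb) (l.foldl (stepB rk vals.length) st) := by
  induction l generalizing fb st with
  | nil => exact hInv
  | cons w t ih =>
    rw [List.foldl_cons, List.foldl_cons]
    exact ih _ _ (fun u hu => hl1 u (by simp [hu])) (fun u hu => hl2 u (by simp [hu]))
      (step_main hp hrk (hl1 w (by simp)) (Or.inl (hl2 w (by simp))) hInv)

-- ===== VERDICT =====
theorem create_fishbone_spec : Claim_equal_create_fishbone := by
  intro qd _ hpre
  unfold Spec_create_fishbone
  obtain ⟨hne, hdrop⟩ := hpre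
  match qd, hne with
  | x :: rest, _ =>
    have hdrop' : ∀ w ∈ rest, w ≠ pvNaN := by
      intro w hw
      intro hc
      exact hdrop (by simpa [hc] using hw)
    set vals := PySem.List.sorted (PySem.Set.ofList (x :: rest)) (fun y => y) false with hvals
    have hp : vals.Pairwise (· < ·) := PySem.List.sorted_ofList_pairwise_lt _
    have hnd : vals.Nodup := hp.imp (fun h => ne_of_lt h)
    have hmem : ∀ w, w ∈ (x :: rest) → w ∈ vals := by
      intro w hw
      rw [hvals, PySem.List.mem_sorted]
      exact (PySem.Set.mem_ofList _ _).2 hw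
    set rkd := (PySem.List.enumerate vals 0).foldl
      (fun d p => PySem.Dict.insert d p.2 p.1) PySem.Dict.empty with hrkd
    have hrk : ∀ w ∈ vals, PySem.Dict.getD rkd w 0 = (vals.idxOf w : Int) := by
      intro w hw
      rw [hrkd, rk_getD_aux vals 0 PySem.Dict.empty hnd w hw]
      simp
    have hm1 : 1 ≤ vals.length := by
      have := hmem x (by simp)
      cases hv : vals with
      | nil => rw [hv] at this; cases this
      | cons _ _ => simp [hv]
    have hInv0 : FbInv vals ([] : List (List Int))
        ([], [], stMake vals.length, stMake vals.length) := by
      refine ⟨rfl, rfl, ?_, ?_, by simp⟩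
      · exact stInv_congr (fun ρ _ => rfl) (stInv_make hm1)
      · exact stInv_congr (fun ρ _ => rfl) (stInv_make hm1)
    have h0 : FbInv vals (stepA [] x)
        (stepB rkd vals.length ([], [], stMake vals.length, stMake vals.length) x) :=
      step_main hp hrk (hmem x (by simp)) (Or.inr rfl) hInv0
    have hfold := fold_inv hp hrk rest (stepA [] x)
      (stepB rkd vals.length ([], [], stMake vals.length, stMake vals.length) x)
      (fun w hw => hmem w (by simp [hw])) hdrop' h0
    have hfin := hfold.1
    rw [show stepA [] x = [[pvNaN, x, pvNaN]] from rfl] at hfin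
    rw [create_fishbone, create_fishbone_alt]
    rw [List.foldl_cons]
    exact hfin.symm
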